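-- pv_equiv track=rewrite | github.com/venysssssssssss/extract-on-demand-sp | sap_automation/iw59.py | partition_iw59_values
-- ===== SOURCE A (Python) =====
-- def partition_iw59_values(values: list[str], partition_count: int) -> list[list[str]]:
--     if partition_count <= 0:
--         raise ValueError("partition_count must be greater than zero.")
--     if not values:
--         return []
--     base_size, remainder = divmod(len(values), partition_count)
--     partitions: list[list[str]] = []
--     start = 0
--     for index in range(partition_count):
--         current_size = base_size + (1 if index < remainder else 0)
--         if current_size <= 0:
--             continue
--         end = start + current_size
--         partitions.append(values[start:end])
--         start = end
--     return [partition for partition in partitions if partition]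
-- ===== SOURCE B (Python) =====
-- def partition_iw59_values(values: list[str], partition_count: int) -> list[list[str]]:
--     if partition_count <= 0:
--         raise ValueError("partition_count must be greater than zero.")
--     partitions: list[list[str]] = []
--     start, remaining = 0, partition_count
--     while start < len(values):
--         # greedy: next chunk is the ceiling of what is left over the slots left
--         size = -((start - len(values)) // remaining)
--         partitions.append(values[start:start + size])
--         start += size
--         remaining -= 1
--     return partitions
-- ===== Notes on version B (the rewrite author's own statement) =====
-- stated objective: alternative
-- what changed: Replaces the precomputed divmod size distribution (loop over all partition_count indices with base+carry sizes, skip guard and trailing non-empty filter) with a greedy loop that repeatedly peels off ceil(items_left / slots_left) items, recomputing the chunk size by one division per chunk and stopping as soon as the list is exhausted; no remainder bookkeeping and no filter pass.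
import Mathlib
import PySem

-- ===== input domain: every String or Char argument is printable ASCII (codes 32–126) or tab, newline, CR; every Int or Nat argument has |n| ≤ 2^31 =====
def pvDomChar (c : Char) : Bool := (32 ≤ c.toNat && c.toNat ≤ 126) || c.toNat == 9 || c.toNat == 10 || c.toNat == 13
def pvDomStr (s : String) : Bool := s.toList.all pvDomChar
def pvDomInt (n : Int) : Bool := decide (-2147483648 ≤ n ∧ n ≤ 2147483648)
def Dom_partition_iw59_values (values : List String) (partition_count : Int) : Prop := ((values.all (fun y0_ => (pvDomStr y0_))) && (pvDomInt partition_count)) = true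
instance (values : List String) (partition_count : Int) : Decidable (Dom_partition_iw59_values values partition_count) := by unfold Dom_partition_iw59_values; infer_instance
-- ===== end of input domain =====

-- B replaces A's single loop over all partition indices (divmod size table, running
-- start accumulator, trailing non-empty filter) with a greedy recursion: peel off one
-- chunk of size ceil(len/count) and recurse on the rest with count-1.
-- Objective: alternative decomposition, same cost.

-- ===== PORT A =====
def partition_iw59_values (values : List String) (partition_count : Int) : List (List String) :=
  if partition_count ≤ 0 then []   -- Python raises ValueError here; excluded by Pre_
  else if values = [] then []
  else
    let base := PySem.Int.floordiv (values.length : Int) partition_count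
    let rem := PySem.Int.mod (values.length : Int) partition_count
    let st := (PySem.List.pyRange 0 partition_count 1).foldl
      (fun (st : List (List String) × Int) index =>
        if base + (if index < rem then (1 : Int) else 0) ≤ 0 then st
        else (st.1 ++ [PySem.List.slice values (some st.2)
                (some (st.2 + (base + (if index < rem then (1 : Int) else 0))))],
              st.2 + (base + (if index < rem then (1 : Int) else 0))))
      ([], 0)
    st.1.filter (fun p => !p.isEmpty)

-- ===== PORT B =====
-- the while loop of B: peel off ceil(items_left/slots_left) while items remain.
-- fuel = values.length bounds the iteration count (every iteration consumes ≥ 1 item).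
def pvAltLoop : Nat → List String → Int → Int → List (List String)
  | 0, _, _, _ => []
  | fuel+1, values, start, remaining =>
    if start < (values.length : Int) then
      let size := -(PySem.Int.floordiv (start - (values.length : Int)) remaining)
      PySem.List.slice values (some start) (some (start + size)) ::
        pvAltLoop fuel values (start + size) (remaining - 1)
    else []

def partition_iw59_values_alt (values : List String) (partition_count : Int) : List (List String) :=
  if partition_count ≤ 0 then []   -- Python raises ValueError here; excluded by Pre_
  else pvAltLoop values.length values 0 partition_count

-- ===== PRECONDITION & SPEC =====
-- Pre_ excludes exactly partition_count ≤ 0, where Python A raises ValueError.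
def Pre_partition_iw59_values (values : List String) (partition_count : Int) : Prop :=
  0 < partition_count
instance (values : List String) (partition_count : Int) : Decidable (Pre_partition_iw59_values values partition_count) := by unfold Pre_partition_iw59_values; infer_instance

def pvWitness_partition_iw59_values : List String × Int := (["a", "b", "c"], 2)

def Spec_partition_iw59_values (values : List String) (partition_count : Int) (out : List (List String)) : Prop := out = partition_iw59_values_alt values partition_count
instance (values : List String) (partition_count : Int) (out : List (List String)) : Decidable (Spec_partition_iw59_values values partition_count out) := by unfold Spec_partition_iw59_values; infer_instance

-- ===== CLAIM (what is proved, stated in full; the proofs are below) =====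
def Claim_equal_partition_iw59_values : Prop := ∀ (values : List String) (partition_count : Int), Dom_partition_iw59_values values partition_count → Pre_partition_iw59_values values partition_count → Spec_partition_iw59_values values partition_count (partition_iw59_values values partition_count)

-- ===== LEMMAS AND PROOFS =====

lemma pvCeil_pos (n k : Int) (hn : 0 < n) (hk : 0 < k) :
    1 ≤ -(PySem.Int.floordiv (-n) k) := by
  rw [PySem.Int.floordiv_eq_ediv_of_pos hk]
  have : (-n) / k < 0 := by rw [Int.ediv_lt_iff_lt_mul hk]; omega
  omega

-- common normal form: chunk i is values[b i : b (i+1)] with b i = i*base + min i rem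
def bnd (base rem i : Int) : Int := i * base + min i rem

def chunkF (values : List String) (base rem i : Int) : Option (List String) :=
  if bnd base rem (i + 1) ≤ bnd base rem i then none
  else some (PySem.List.slice values (some (bnd base rem i)) (some (bnd base rem (i + 1))))

def chunks (values : List String) (k : Int) : List (List String) :=
  (PySem.List.pyRange 0 k 1).filterMap
    (chunkF values (PySem.Int.floordiv (values.length : Int) k)
                   (PySem.Int.mod (values.length : Int) k))

lemma chunks_nil (k : Int) : chunks [] k = [] := by
  unfold chunks
  by_cases hk : k ≤ 0
  · rw [PySem.List.pyRange_one_eq_nil hk]; simp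
  · apply List.filterMap_eq_nil_iff.mpr
    intro i hi
    rw [PySem.List.mem_pyRange_one] at hi
    have hb : PySem.Int.floordiv ((([] : List String).length : Nat) : Int) k = 0 := by
      rw [PySem.Int.floordiv_eq_ediv_of_pos (by omega)]; simp
    have hmul := PySem.Int.floordiv_mul_add_mod ((([] : List String).length : Nat) : Int) k
    rw [hb] at hmul
    have hr : PySem.Int.mod ((([] : List String).length : Nat) : Int) k = 0 := by
      simp at hmul; simpa using hmul
    unfold chunkF bnd
    rw [hb, hr, if_pos (by omega)]

-- ===== the A side: the fold with running start equals the normal form =====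

-- invariant of A's slicing fold: starting at boundary bnd j, it appends exactly the
-- non-empty chunks for the remaining indices and ends at boundary bnd k
lemma foldA_inv (values : List String) (base rem k : Int) (hbase : 0 ≤ base) :
    ∀ (m : Nat) (j : Int) (acc : List (List String)), 0 ≤ j → j ≤ k → (k - j).toNat = m →
    ((PySem.List.pyRange j k 1).foldl
      (fun (st : List (List String) × Int) index =>
        if base + (if index < rem then (1 : Int) else 0) ≤ 0 then st
        else (st.1 ++ [PySem.List.slice values (some st.2)
                (some (st.2 + (base + (if index < rem then (1 : Int) else 0))))],
              st.2 + (base + (if index < rem then (1 : Int) else 0))))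
      (acc, j * base + min j rem))
    = (acc ++ (PySem.List.pyRange j k 1).filterMap
        (fun i =>
          if base + (if i < rem then (1 : Int) else 0) ≤ 0 then none
          else some (PySem.List.slice values (some (i * base + min i rem))
                      (some (i * base + min i rem + (base + (if i < rem then (1 : Int) else 0)))))),
       k * base + min k rem) := by
  intro m
  induction m with
  | zero =>
    intro j acc h0 hk hm
    have : j = k := by omega
    subst this
    rw [PySem.List.pyRange_one_eq_nil (by omega)]
    simp
  | succ m ih =>
    intro j acc h0 hk hm
    have hjk : j < k := by omega
    rw [PySem.List.pyRange_one_cons hjk]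
    simp only [List.foldl_cons, List.filterMap_cons]
    by_cases hcs : base + (if j < rem then (1 : Int) else 0) ≤ 0
    · -- skipped chunk: base = 0 and j ≥ rem, boundary unchanged
      have hjr : ¬ j < rem := by
        intro h; simp [h] at hcs; omega
      have hb0 : base = 0 := by simp [hjr] at hcs; omega
      have hmin : min j rem = min (j+1) rem := by omega
      simp only [hcs, if_pos]
      have heq : j * base + min j rem = (j+1) * base + min (j+1) rem := by
        rw [hb0, ← hmin]; ring
      rw [heq, ih (j+1) acc (by omega) (by omega) (by omega)]
    · -- taken chunk: boundary advances to bnd (j+1)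
      simp only [hcs, if_false]
      have hbnd : j * base + min j rem + (base + (if j < rem then (1 : Int) else 0))
          = (j+1) * base + min (j+1) rem := by
        by_cases h : j < rem <;> simp [h] <;> ring_nf <;> omega
      rw [hbnd]
      rw [ih (j+1) (acc ++ [PySem.List.slice values (some (j * base + min j rem))
          (some ((j+1) * base + min (j+1) rem))])
          (by omega) (by omega) (by omega)]
      simp

-- a slice of positive requested size within range is non-empty
lemma slice_pos_ne_nil (values : List String) (a b : Int)
    (h0 : 0 ≤ a) (hab : a < b) (hb : b ≤ (values.length : Int)) :
    PySem.List.slice values (some a) (some b) ≠ [] := by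
  rw [PySem.List.slice_toNat values h0 (by omega)]
  intro h
  have := congrArg List.length h
  simp [List.length_take, List.length_drop] at this
  omega

lemma A_eq_chunks (values : List String) (k : Int) (hk : 0 < k) (hv : values ≠ []) :
    partition_iw59_values values k = chunks values k := by
  have hk' : ¬ k ≤ 0 := by omega
  unfold partition_iw59_values chunks chunkF bnd
  simp only [hk', if_false, if_neg hv]
  set n : Int := (values.length : Int) with hn
  set base := PySem.Int.floordiv n k with hbase
  set rem := PySem.Int.mod n k with hrem
  have hn0 : 0 ≤ n := by positivity
  have hbase0 : 0 ≤ base := by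
    rw [hbase, PySem.Int.floordiv_eq_ediv_of_pos hk]
    exact Int.ediv_nonneg hn0 (by omega)
  have hrem0 : 0 ≤ rem := by rw [hrem]; exact PySem.Int.mod_nonneg n hk
  have hremk : rem < k := by rw [hrem]; exact PySem.Int.mod_lt n hk
  have hbk : k * base + min k rem = n := by
    have := PySem.Int.floordiv_mul_add_mod n k
    rw [← hbase, ← hrem] at this
    have hmin : min k rem = rem := by omega
    rw [hmin]; linarith [this]
  have bnd_ok : ∀ i : Int, 0 ≤ i → i < k →
      0 ≤ i * base + min i rem ∧ (i+1) * base + min (i+1) rem ≤ n := by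
    intro i h0 hik
    constructor
    · have := mul_nonneg h0 hbase0; omega
    · have := mul_le_mul_of_nonneg_right (show i + 1 ≤ k by omega) hbase0
      omega
  have A0 := foldA_inv values base rem k hbase0 (k - 0).toNat 0 [] le_rfl (by omega) rfl
  rw [show (0 : Int) * base + min 0 rem = 0 from by omega] at A0
  rw [A0]
  simp only [List.nil_append]
  have hcongr : (PySem.List.pyRange 0 k 1).filterMap
      (fun i =>
        if base + (if i < rem then (1 : Int) else 0) ≤ 0 then none
        else some (PySem.List.slice values (some (i * base + min i rem))
                    (some (i * base + min i rem + (base + (if i < rem then (1 : Int) else 0))))))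
      = (PySem.List.pyRange 0 k 1).filterMap
      (fun i =>
        if (i+1) * base + min (i+1) rem ≤ i * base + min i rem then none
        else some (PySem.List.slice values (some (i * base + min i rem))
                    (some ((i+1) * base + min (i+1) rem)))) := by
    apply List.filterMap_congr
    intro i hi
    rw [PySem.List.mem_pyRange_one] at hi
    have hbnd : i * base + min i rem + (base + (if i < rem then (1 : Int) else 0))
        = (i+1) * base + min (i+1) rem := by
      by_cases h : i < rem <;> simp [h] <;> ring_nf <;> omega
    have hiff : (base + (if i < rem then (1 : Int) else 0) ≤ 0)
        ↔ ((i+1) * base + min (i+1) rem ≤ i * base + min i rem) := by omega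
    by_cases h : base + (if i < rem then (1 : Int) else 0) ≤ 0
    · simp [h, hiff.mp h]
    · simp only [h, if_false, hbnd]
      rw [if_neg (by omega)]
  rw [hcongr]
  apply List.filter_eq_self.mpr
  intro p hp
  rw [List.mem_filterMap] at hp
  obtain ⟨i, hi, hpi⟩ := hp
  rw [PySem.List.mem_pyRange_one] at hi
  by_cases h : (i+1) * base + min (i+1) rem ≤ i * base + min i rem
  · simp [h] at hpi
  · simp only [h, if_false, Option.some_inj] at hpi
    have := bnd_ok i hi.1 hi.2
    have hne := slice_pos_ne_nil values (i * base + min i rem)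
      ((i+1) * base + min (i+1) rem) this.1 (by omega) this.2
    rw [← hpi]
    simpa using hne

-- ===== the B side: greedy ceil-chunk recursion equals the normal form =====

-- the peeled chunk size is exactly the first boundary: ceil(n/k) = n//k + min 1 (n%k)
lemma ceil_eq (n k : Int) (hk : 0 < k) :
    -(PySem.Int.floordiv (-n) k) = PySem.Int.floordiv n k + min 1 (PySem.Int.mod n k) := by
  have hd := PySem.Int.floordiv_mul_add_mod n k
  have hr0 := PySem.Int.mod_nonneg n hk
  have hrk := PySem.Int.mod_lt n hk
  set base := PySem.Int.floordiv n k
  set rem := PySem.Int.mod n k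
  rw [PySem.Int.floordiv_eq_ediv_of_pos hk]
  by_cases h : 0 < rem
  · have he : (-n) = (k - rem) + k * (-base - 1) := by linear_combination hd
    rw [he, Int.add_mul_ediv_left _ _ (by omega : k ≠ 0),
        Int.ediv_eq_zero_of_lt (by omega) (by omega)]
    omega
  · have hr : rem = 0 := by omega
    rw [hr] at hd
    have he : (-n) = 0 + k * (-base) := by linear_combination hd
    rw [he, Int.add_mul_ediv_left _ _ (by omega : k ≠ 0)]
    simp only [Int.zero_ediv]
    omega

-- after peeling the first chunk, the remaining list has quotient base and remainder rem - min 1 rem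
lemma next_divmod (n' k base rem : Int) (hk2 : 2 ≤ k)
    (h : n' = (k-1) * base + (rem - min 1 rem))
    (_hb0 : 0 ≤ base) (hr0 : 0 ≤ rem) (hrk : rem < k) :
    PySem.Int.floordiv n' (k-1) = base ∧ PySem.Int.mod n' (k-1) = rem - min 1 rem := by
  have hq : n' / (k-1) = base := by
    rw [h, show (k-1)*base + (rem - min 1 rem) = (rem - min 1 rem) + (k-1)*base from by ring,
        Int.add_mul_ediv_left _ _ (by omega : k - 1 ≠ 0),
        Int.ediv_eq_zero_of_lt (by omega) (by omega)]
    omega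
  have hq' : PySem.Int.floordiv n' (k-1) = base := by
    rw [PySem.Int.floordiv_eq_ediv_of_pos (by omega)]; exact hq
  refine ⟨hq', ?_⟩
  have hd := PySem.Int.floordiv_mul_add_mod n' (k-1)
  rw [hq'] at hd
  have e : base * (k-1) = (k-1) * base := by ring
  linarith [hd, h, e]

-- the boundary staircase of (n, k) shifted past the first chunk is that of (n - s, k - 1)
lemma bnd_shift (base rem i : Int) (hi : 0 ≤ i) (hr0 : 0 ≤ rem) :
    bnd base rem (1 + i) = (base + min 1 rem) + bnd base (rem - min 1 rem) i := by
  unfold bnd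
  have e : (1 + i) * base = base + i * base := by ring
  rw [e]
  generalize i * base = t
  omega

lemma bnd_nonneg (base rem i : Int) (hb0 : 0 ≤ base) (hr0 : 0 ≤ rem) (hi : 0 ≤ i) :
    0 ≤ bnd base rem i := by
  unfold bnd
  have := mul_nonneg hi hb0
  omega

-- a shifted slice of the original list is a slice of the dropped rest
lemma slice_shift (xs : List String) (s a b : Int) (hs : 0 ≤ s) (ha : 0 ≤ a) (hab : a ≤ b) :
    PySem.List.slice xs (some (s + a)) (some (s + b))
      = PySem.List.slice (xs.drop s.toNat) (some a) (some b) := by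
  rw [PySem.List.slice_toNat xs (by omega) (by omega),
      PySem.List.slice_toNat (xs.drop s.toNat) ha (by omega), List.drop_drop]
  have h1 : (s+b).toNat - (s+a).toNat = b.toNat - a.toNat := by omega
  have h2 : s.toNat + a.toNat = (s+a).toNat := by omega
  rw [h1, h2]

-- one greedy step: chunks values k = first ceil-chunk :: chunks rest (k-1)
lemma chunks_cons (values : List String) (k : Int) (hk : 0 < k) (hv : values ≠ []) :
    chunks values k =
      values.take (-(PySem.Int.floordiv (-(values.length : Int)) k)).toNat ::
      chunks (values.drop (-(PySem.Int.floordiv (-(values.length : Int)) k)).toNat) (k - 1) := by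
  have hlen : 0 < values.length := List.length_pos_iff.mpr hv
  set n : Int := (values.length : Int) with hn
  have hn1 : 1 ≤ n := by rw [hn]; exact_mod_cast hlen
  have hd := PySem.Int.floordiv_mul_add_mod n k
  have hr0 := PySem.Int.mod_nonneg n hk
  have hrk := PySem.Int.mod_lt n hk
  have hs := ceil_eq n k hk
  set base := PySem.Int.floordiv n k with hbase
  set rem := PySem.Int.mod n k with hrem
  have hb0 : 0 ≤ base := by
    rw [hbase, PySem.Int.floordiv_eq_ediv_of_pos hk]
    exact Int.ediv_nonneg (by omega) (by omega)
  set s : Int := base + min 1 rem with hsdef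
  -- hs : -(floordiv (-n) k) = s after the folds above
  have hs1 : 1 ≤ s := by
    by_cases h : 0 < rem
    · have : 1 ≤ min 1 rem := by omega
      omega
    · have hr : rem = 0 := by omega
      have hbn : 1 ≤ base := by
        by_contra hb
        have hb' : base = 0 := by omega
        rw [hb', hr] at hd
        simp at hd
        omega
      omega
  have emul : base * k = base + (k-1) * base := by ring
  have hsn : s ≤ n := by
    have h1 := mul_nonneg (show (0:Int) ≤ k - 1 by omega) hb0
    have h2 : min 1 rem ≤ rem := min_le_right 1 rem
    linarith [hd, emul]
  rw [hs]
  have hc0 : chunkF values base rem 0 = some (values.take s.toNat) := by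
    unfold chunkF
    have hb1 : bnd base rem (0+1) = s := by unfold bnd; omega
    have hb0' : bnd base rem 0 = 0 := by unfold bnd; omega
    rw [hb1, hb0', if_neg (by omega)]
    rw [PySem.List.slice_toNat values le_rfl (by omega)]
    simp
  by_cases hk1 : k = 1
  · -- one partition: a single chunk holding the whole list
    subst hk1
    have hr : rem = 0 := by omega
    have hsn' : s = n := by
      have : base * 1 = base := by ring
      omega
    conv_lhs => unfold chunks
    conv_rhs => unfold chunks
    rw [← hn, ← hbase, ← hrem]
    rw [PySem.List.pyRange_one_cons (show (0:Int) < 1 by omega)]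
    rw [PySem.List.pyRange_one_eq_nil (show (1:Int) ≤ 0 + 1 by omega)]
    rw [PySem.List.pyRange_one_eq_nil (show (1:Int) - 1 ≤ 0 by omega)]
    simp only [List.filterMap_cons, List.filterMap_nil, hc0]
  · -- k ≥ 2: the tail of the staircase is the staircase of (n - s, k - 1)
    have hk2 : 2 ≤ k := by omega
    set rem' : Int := rem - min 1 rem with hrem'
    have hrest : ((values.drop s.toNat).length : Int) = n - s := by
      simp only [List.length_drop]
      omega
    have hnd := next_divmod (n - s) k base rem hk2 (by linarith [hd, emul]) hb0 (by omega) (by omega)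
    conv_lhs => unfold chunks
    conv_rhs => unfold chunks
    rw [← hn, ← hbase, ← hrem, hrest, hnd.1, hnd.2, ← hrem']
    rw [PySem.List.pyRange_one_cons hk]
    simp only [List.filterMap_cons, hc0]
    congr 1
    rw [show (0:Int) + 1 = 1 from by omega]
    rw [PySem.List.pyRange_one 1 k, PySem.List.pyRange_one 0 (k-1),
        show (k - 1 - 0).toNat = (k-1).toNat from by omega,
        List.filterMap_map, List.filterMap_map]
    apply List.filterMap_congr
    intro j hj
    rw [List.mem_range] at hj
    simp only [Function.comp_apply, zero_add]
    have hi0 : (0:Int) ≤ (j:Int) := by positivity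
    have hbs1 := bnd_shift base rem (j:Int) hi0 (by omega)
    have hbs2 := bnd_shift base rem ((j:Int)+1) (by omega) (by omega)
    unfold chunkF
    rw [show (1:Int) + (j:Int) + 1 = 1 + ((j:Int)+1) from by omega]
    rw [hbs1, hbs2, ← hrem', ← hsdef]
    by_cases hcond : bnd base rem' ((j:Int)+1) ≤ bnd base rem' (j:Int)
    · rw [if_pos (by omega), if_pos hcond]
    · rw [if_neg (by omega), if_neg hcond]
      have hbn0 := bnd_nonneg base rem' (j:Int) hb0 (by omega) hi0
      rw [slice_shift values s _ _ (by omega) hbn0 (by omega)]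

lemma pvAltLoop_stop (fuel : Nat) (values : List String) (start k : Int)
    (h : ¬ start < (values.length : Int)) : pvAltLoop fuel values start k = [] := by
  cases fuel <;> simp [pvAltLoop, h]

-- loop invariant: from position `start` with `k` slots left, the loop produces
-- exactly the greedy chunking of the remaining suffix
lemma loop_eq : ∀ (fuel : Nat) (values : List String) (start k : Int),
    0 ≤ start → (values.drop start.toNat).length ≤ fuel → 0 < k →
    pvAltLoop fuel values start k = chunks (values.drop start.toNat) k := by
  intro fuel
  induction fuel with
  | zero =>
    intro values start k h0 hf hk
    simp only [List.length_drop] at hf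
    rw [pvAltLoop_stop _ _ _ _ (by omega)]
    rw [List.drop_eq_nil_of_le (by omega), chunks_nil]
  | succ fuel ih =>
    intro values start k h0 hf hk
    by_cases hlt : start < (values.length : Int)
    · set n : Int := (values.length : Int) with hn
      set d := values.drop start.toNat with hd
      have hdlen : (d.length : Int) = n - start := by
        rw [hd]; simp only [List.length_drop]; omega
      have hdne : d ≠ [] := by
        intro h
        rw [h] at hdlen
        simp at hdlen
        omega
      have hsz : -(PySem.Int.floordiv (start - n) k)
          = -(PySem.Int.floordiv (-((d.length : Nat) : Int)) k) := by
        rw [hdlen, show start - n = -(n - start) from by ring]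
      set s : Int := -(PySem.Int.floordiv (-((d.length : Nat) : Int)) k) with hs
      have hs1 : 1 ≤ s := by
        rw [hs]; exact pvCeil_pos _ _ (by omega) hk
      simp only [pvAltLoop]
      rw [← hn, hsz, if_pos hlt]
      rw [chunks_cons d k hk hdne, ← hs]
      congr 1
      · -- the sliced chunk is the take of the suffix
        have hsh := slice_shift values start 0 s h0 le_rfl (by omega)
        rw [show (some start : Option Int) = some (start + 0) from by norm_num, hsh]
        rw [PySem.List.slice_toNat d le_rfl (by omega)]
        simp
      · by_cases hend : start + s < n
        · have hk2 : 2 ≤ k := by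
            by_contra hc
            have hk1 : k = 1 := by omega
            have : s = ((d.length : Nat) : Int) := by
              rw [hs, hk1, PySem.Int.floordiv_eq_ediv_of_pos (show (0:Int) < 1 by omega)]
              simp
            omega
          rw [ih values (start + s) (k-1) (by omega)
              (by simp only [List.length_drop]; omega) (by omega)]
          congr 1
          rw [hd, List.drop_drop, show (start + s).toNat = start.toNat + s.toNat from by omega]
        · rw [pvAltLoop_stop _ _ _ _ (by omega)]
          rw [List.drop_eq_nil_of_le (by omega), chunks_nil]
    · rw [pvAltLoop_stop _ _ _ _ hlt]
      rw [List.drop_eq_nil_of_le (by omega), chunks_nil]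

lemma alt_eq_chunks (values : List String) (k : Int) (hk : 0 < k) :
    partition_iw59_values_alt values k = chunks values k := by
  unfold partition_iw59_values_alt
  rw [if_neg (by omega)]
  have h := loop_eq values.length values 0 k le_rfl (by simp) hk
  simpa using h

-- ===== VERDICT (by name: the statement is the Claim_ definition above) =====
theorem partition_iw59_values_spec : Claim_equal_partition_iw59_values := by
  intro values k _ hk
  unfold Pre_partition_iw59_values at hk
  unfold Spec_partition_iw59_values
  by_cases hv : values = []
  · subst hv
    rw [partition_iw59_values, alt_eq_chunks [] k hk, chunks_nil]
    simp [show ¬ k ≤ 0 by omega]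
  · rw [A_eq_chunks values k hk hv, alt_eq_chunks values k hk]
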